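-- pv_equiv track=rewrite | github.com/lukestanley/RobotThingExplainer | words.py | find_invalid_words
-- ===== SOURCE A (Python) =====
-- import string
--
-- def find_invalid_words(text, valid_words, extra_words=[]):
--     words = text.lower().split()
--     invalid_words = set()
--
--     # Create a translation table to remove punctuation
--     translator = str.maketrans('', '', string.punctuation)
--
--     def singularise(word):
--         """Convert simple plural forms or conjugations to singular."""
--         if word.endswith('es') and len(word) > 2:
--             base_word = word[:-2]
--             if base_word in valid_words or base_word in extra_words:
--                 return base_word
--         if word.endswith('s') and len(word) > 1:
--             base_word = word[:-1]
--             if base_word in valid_words or base_word in extra_words: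
--                 return base_word
--         return word
--
--     # Create a copy of the valid words list and add extra words
--     combined_words = set(valid_words).union(extra_words)
--
--     for word in words:
--         cleaned_word = word.translate(translator)  # Remove punctuation
--         singular_word = singularise(cleaned_word)  # Convert to singular form
--         if singular_word not in combined_words:
--             invalid_words.add(cleaned_word)
--
--     return list(invalid_words)
-- ===== SOURCE B (Python) =====
-- import string
--
-- def find_invalid_words(text, valid_words, extra_words=[]):
--     # Precompute every acceptable surface form (word, word+'s', word+'es')
--     # once, then do one flat membership pass over the cleaned tokens.
--     table = str.maketrans('', '', string.punctuation)
--     combined = set(valid_words) | set(extra_words)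
--     acceptable = set(combined)
--     for v in combined:
--         if v:
--             acceptable.add(v + 's')
--             acceptable.add(v + 'es')
--     invalid = set()
--     for word in text.lower().split():
--         cleaned = word.translate(table)
--         if cleaned not in acceptable:
--             invalid.add(cleaned)
--     return list(invalid)
-- ===== Notes on version B (the rewrite author's own statement) =====
-- stated objective: alternative
-- what changed: B precomputes one set of all acceptable surface forms (v, v+'s', v+'es' for each nonempty vocabulary word) and replaces A's per-token singularise helper with its branching and list scans by a single flat membership pass over the cleaned tokens.
import Mathlib
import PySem

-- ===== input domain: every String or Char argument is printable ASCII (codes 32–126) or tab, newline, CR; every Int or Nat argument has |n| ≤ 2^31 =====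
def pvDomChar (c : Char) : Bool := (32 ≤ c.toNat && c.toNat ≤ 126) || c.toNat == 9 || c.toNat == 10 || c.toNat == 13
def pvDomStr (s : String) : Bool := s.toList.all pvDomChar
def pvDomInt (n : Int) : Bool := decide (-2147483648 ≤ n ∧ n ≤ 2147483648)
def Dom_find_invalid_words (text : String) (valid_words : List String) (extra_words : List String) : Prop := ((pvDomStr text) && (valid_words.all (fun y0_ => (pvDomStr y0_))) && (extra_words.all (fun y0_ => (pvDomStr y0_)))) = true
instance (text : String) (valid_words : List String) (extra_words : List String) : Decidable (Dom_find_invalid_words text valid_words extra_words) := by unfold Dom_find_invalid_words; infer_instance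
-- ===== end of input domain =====

-- B precomputes the set of all acceptable surface forms (v, v+'s', v+'es' for nonempty v) once
-- and replaces A's per-token singularise (which scans the valid/extra lists) by one flat membership pass.
-- Both programs return list(set(...)): the RETURN VALUE is compared as the set of its elements
-- (the ports realise it in insertion order).

-- ===== PORT A =====
-- string.punctuation
def pvPunct : List Char := "!\"#$%&'()*+,-./:;<=>?@[\\]^_`{|}~".toList

-- word.translate(str.maketrans('', '', string.punctuation)): exact — a delete-table translate keeps, in order, the characters not in the table
def pvCleanA (w : String) : String :=
  String.ofList (w.toList.filter (fun c => !(pvPunct.contains c)))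

-- the second `if` of singularise and the final `return word` (A's fall-through)
def pvSingularS (word : String) (valid_words extra_words : List String) : String :=
  if PySem.Chars.endswith word.toList ['s'] && decide (word.toList.length > 1) then
    -- base_word = word[:-1]
    if String.ofList word.toList.dropLast ∈ valid_words ∨ String.ofList word.toList.dropLast ∈ extra_words
    then String.ofList word.toList.dropLast else word
  else word

def pvSingularise (word : String) (valid_words extra_words : List String) : String :=
  if PySem.Chars.endswith word.toList ['e','s'] && decide (word.toList.length > 2) then
    -- base_word = word[:-2]
    if String.ofList word.toList.dropLast.dropLast ∈ valid_words ∨ String.ofList word.toList.dropLast.dropLast ∈ extra_words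
    then String.ofList word.toList.dropLast.dropLast
    else pvSingularS word valid_words extra_words
  else pvSingularS word valid_words extra_words

def find_invalid_words (text : String) (valid_words : List String) (extra_words : List String) : List String :=
  let words := PySem.Str.split₀ (PySem.Str.lower text)
  let combined_words : PySem.Set String := PySem.Set.union (PySem.Set.ofList valid_words) extra_words
  words.foldl (fun invalid_words w =>
    let cleaned := pvCleanA w
    let singular := pvSingularise cleaned valid_words extra_words
    if PySem.Set.contains combined_words singular then invalid_words
    else PySem.Set.add invalid_words cleaned) PySem.Set.empty

-- ===== PORT B =====
-- ''.join(c for c in word if c not in punct)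
def pvCleanB (w : String) : String :=
  String.ofList (w.toList.filter (fun c => !(pvPunct.contains c)))

-- for v in combined: if v: acceptable.add(v+'s'); acceptable.add(v+'es')   (starting from set(combined))
def pvAcceptable (combined : PySem.Set String) : PySem.Set String :=
  combined.foldl
    (fun acc v => if v ≠ "" then PySem.Set.add (PySem.Set.add acc (v ++ "s")) (v ++ "es") else acc)
    (PySem.Set.ofList combined)

def find_invalid_words_alt (text : String) (valid_words : List String) (extra_words : List String) : List String :=
  let combined : PySem.Set String := PySem.Set.union (PySem.Set.ofList valid_words) (PySem.Set.ofList extra_words)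
  let acceptable := pvAcceptable combined
  (PySem.Str.split₀ (PySem.Str.lower text)).foldl
    (fun invalid w =>
      let cleaned := pvCleanB w
      if PySem.Set.contains acceptable cleaned then invalid
      else PySem.Set.add invalid cleaned)
    PySem.Set.empty

-- ===== PRECONDITION & SPEC =====
def Spec_find_invalid_words (text : String) (valid_words : List String) (extra_words : List String) (out : List String) : Prop := out = find_invalid_words_alt text valid_words extra_words
instance (text : String) (valid_words : List String) (extra_words : List String) (out : List String) : Decidable (Spec_find_invalid_words text valid_words extra_words out) := by unfold Spec_find_invalid_words; infer_instance

-- ===== CLAIM (what is proved, stated in full; the proofs are below) =====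
def Claim_equal_find_invalid_words : Prop := ∀ (text : String) (valid_words : List String) (extra_words : List String), Dom_find_invalid_words text valid_words extra_words → Spec_find_invalid_words text valid_words extra_words (find_invalid_words text valid_words extra_words)

-- ===== LEMMAS AND PROOFS =====

theorem pv_ne_empty_iff (v : String) : v ≠ "" ↔ v.toList ≠ [] := by
  constructor
  · intro h hn; exact h (String.toList_inj.mp (by simpa using hn))
  · intro h hv; exact h (by simp [hv])

theorem pv_eq_append_iff (w v : String) (suf : String) :
    w = v ++ suf ↔ w.toList = v.toList ++ suf.toList := by
  rw [← String.toList_inj]; simp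

theorem pv_mem_acc_foldl (l : List String) (init : List String) (x : String) :
    x ∈ l.foldl (fun acc v => if v ≠ "" then PySem.Set.add (PySem.Set.add acc (v ++ "s")) (v ++ "es") else acc) init
    ↔ x ∈ init ∨ ∃ v ∈ l, v ≠ "" ∧ (x = v ++ "s" ∨ x = v ++ "es") := by
  induction l generalizing init with
  | nil => simp
  | cons a l ih =>
    simp only [List.foldl_cons, ih]
    by_cases ha : a = "" <;> simp [ha, PySem.Set.mem_add, or_assoc]

theorem pv_mem_acceptable (c : PySem.Set String) (x : String) :
    x ∈ pvAcceptable c ↔ x ∈ c ∨ ∃ v ∈ c, v ≠ "" ∧ (x = v ++ "s" ∨ x = v ++ "es") := by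
  unfold pvAcceptable
  rw [pv_mem_acc_foldl]
  simp [PySem.Set.mem_ofList]

-- w ends with suf (as a nonempty proper suffix), stated through the decomposition w = v ++ suf
theorem pv_suffix_facts (w v : String) (suf : List Char) (hs : w.toList = v.toList ++ suf)
    (hvne : v ≠ "") :
    PySem.Chars.endswith w.toList suf = true ∧ w.toList.length > suf.length := by
  have hv : v.toList ≠ [] := (pv_ne_empty_iff v).mp hvne
  refine ⟨(PySem.Chars.endswith_iff _ _).mpr ⟨v.toList, hs.symm⟩, ?_⟩
  have hpos : v.toList.length > 0 := List.length_pos_iff.mpr hv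
  rw [hs, List.length_append]
  omega

theorem pv_condS_iff (w : String) (valid extra : List String) :
    (pvSingularS w valid extra ∈ valid ∨ pvSingularS w valid extra ∈ extra)
    ↔ ((w ∈ valid ∨ w ∈ extra) ∨
        ∃ v, (v ∈ valid ∨ v ∈ extra) ∧ v ≠ "" ∧ w = v ++ "s") := by
  unfold pvSingularS
  split_ifs with hg hm
  · -- guard and membership hold: result is the base, both sides true
    obtain ⟨hes, hlen⟩ := Bool.and_eq_true_iff.mp hg
    obtain ⟨t, hw⟩ := (PySem.Chars.endswith_iff _ _).mp hes
    have hdrop : w.toList.dropLast = t := by rw [← hw]; simp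
    have ht : t ≠ [] := by
      intro h0; rw [h0] at hw
      simp only [decide_eq_true_eq] at hlen
      rw [← hw] at hlen; simp at hlen
    constructor
    · intro _
      refine Or.inr ⟨String.ofList w.toList.dropLast, hm, ?_, ?_⟩
      · rw [pv_ne_empty_iff]; simpa [hdrop] using ht
      · rw [pv_eq_append_iff]; simp [← hw]
    · intro _; exact hm
  · -- guard holds, membership fails: result is w; the ∃-side would force membership
    constructor
    · exact Or.inl
    · rintro (hw | ⟨v, hv, hne, hs⟩)
      · exact hw
      · exfalso
        rw [pv_eq_append_iff] at hs
        have hdrop : w.toList.dropLast = v.toList := by rw [hs]; simp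
        exact hm (by simpa [hdrop] using hv)
  · -- guard fails: result is w; the ∃-side would force the guard
    constructor
    · exact Or.inl
    · rintro (hw | ⟨v, hv, hne, hs⟩)
      · exact hw
      · exfalso
        rw [pv_eq_append_iff] at hs
        obtain ⟨hend, hlen⟩ := pv_suffix_facts w v ['s'] (by simpa using hs) hne
        refine hg ?_
        simp only [hend, Bool.true_and, decide_eq_true_eq]
        simpa using hlen

theorem pv_cond_iff (w : String) (valid extra : List String) :
    (pvSingularise w valid extra ∈ valid ∨ pvSingularise w valid extra ∈ extra)
    ↔ ((w ∈ valid ∨ w ∈ extra) ∨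
        ∃ v, (v ∈ valid ∨ v ∈ extra) ∧ v ≠ "" ∧ (w = v ++ "s" ∨ w = v ++ "es")) := by
  have hsplit : (∃ v, (v ∈ valid ∨ v ∈ extra) ∧ v ≠ "" ∧ (w = v ++ "s" ∨ w = v ++ "es"))
      ↔ (∃ v, (v ∈ valid ∨ v ∈ extra) ∧ v ≠ "" ∧ w = v ++ "s")
        ∨ (∃ v, (v ∈ valid ∨ v ∈ extra) ∧ v ≠ "" ∧ w = v ++ "es") := by
    constructor
    · rintro ⟨v, hv, hne, (h | h)⟩
      · exact Or.inl ⟨v, hv, hne, h⟩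
      · exact Or.inr ⟨v, hv, hne, h⟩
    · rintro (⟨v, hv, hne, h⟩ | ⟨v, hv, hne, h⟩)
      · exact ⟨v, hv, hne, Or.inl h⟩
      · exact ⟨v, hv, hne, Or.inr h⟩
  unfold pvSingularise
  split_ifs with hg hm
  · -- es-guard and es-membership hold: result is the es-base, both sides true
    obtain ⟨hes, hlen⟩ := Bool.and_eq_true_iff.mp hg
    obtain ⟨t, hw⟩ := (PySem.Chars.endswith_iff _ _).mp hes
    have hdrop : w.toList.dropLast.dropLast = t := by
      rw [← hw, show t ++ ['e', 's'] = (t ++ ['e']) ++ ['s'] by simp]; simp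
    have ht : t ≠ [] := by
      intro h0; rw [h0] at hw
      simp only [decide_eq_true_eq] at hlen
      rw [← hw] at hlen; simp at hlen
    constructor
    · intro _
      refine Or.inr ⟨String.ofList w.toList.dropLast.dropLast, hm, ?_, Or.inr ?_⟩
      · rw [pv_ne_empty_iff]; simpa [hdrop] using ht
      · rw [pv_eq_append_iff]; simp [← hw]
    · intro _; exact hm
  · -- es-guard holds, es-membership fails: an es-decomposition would force that membership
    rw [pv_condS_iff, hsplit]
    have hno : ¬ ∃ v, (v ∈ valid ∨ v ∈ extra) ∧ v ≠ "" ∧ w = v ++ "es" := by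
      rintro ⟨v, hv, hne, hs⟩
      rw [pv_eq_append_iff] at hs
      have hdrop : w.toList.dropLast.dropLast = v.toList := by
        rw [hs, show v.toList ++ "es".toList = (v.toList ++ ['e']) ++ ['s'] by simp]; simp
      exact hm (by simpa [hdrop] using hv)
    constructor
    · rintro (h | h)
      · exact Or.inl h
      · exact Or.inr (Or.inl h)
    · rintro (h | (h | h))
      · exact Or.inl h
      · exact Or.inr h
      · exact absurd h hno
  · -- es-guard fails: an es-decomposition would force the guard
    rw [pv_condS_iff, hsplit]
    have hno : ¬ ∃ v, (v ∈ valid ∨ v ∈ extra) ∧ v ≠ "" ∧ w = v ++ "es" := by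
      rintro ⟨v, hv, hne, hs⟩
      rw [pv_eq_append_iff] at hs
      obtain ⟨hend, hlen⟩ := pv_suffix_facts w v ['e', 's'] (by simpa using hs) hne
      refine hg ?_
      simp only [hend, Bool.true_and, decide_eq_true_eq]
      simpa using hlen
    constructor
    · rintro (h | h)
      · exact Or.inl h
      · exact Or.inr (Or.inl h)
    · rintro (h | (h | h))
      · exact Or.inl h
      · exact Or.inr h
      · exact absurd h hno

theorem pv_contains_eq (valid extra : List String) (w : String) :
    PySem.Set.contains (PySem.Set.union (PySem.Set.ofList valid) extra) (pvSingularise w valid extra)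
    = PySem.Set.contains (pvAcceptable (PySem.Set.union (PySem.Set.ofList valid) (PySem.Set.ofList extra))) w := by
  rw [Bool.eq_iff_iff, PySem.Set.contains_iff, PySem.Set.contains_iff, pv_mem_acceptable]
  simp only [PySem.Set.mem_union, PySem.Set.mem_ofList]
  exact pv_cond_iff w valid extra

-- ===== VERDICT (by name: the statement is the Claim_ definition above) =====
theorem find_invalid_words_spec : Claim_equal_find_invalid_words := by
  intro text valid_words extra_words _
  unfold Spec_find_invalid_words find_invalid_words find_invalid_words_alt
  apply PySem.List.foldl_congr_mem
  intro acc w _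
  simp only [show pvCleanB w = pvCleanA w from rfl, pv_contains_eq]
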